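-- pv_equiv track=rewrite | github.com/willyt3hwhale/aikeeper-willie | ralph.py | get_next_task
-- ===== SOURCE A (Python) =====
-- def get_children(tasks, parent_id):
--     """Get direct children of a task (A → A.1, A.2, not A.1.1)."""
--     prefix = parent_id + '.'
--     parent_depth = parent_id.count('.')
--     return [t for t in tasks if t['id'].startswith(prefix)
--             and t['id'].count('.') == parent_depth + 1]
--
-- def get_next_task(tasks):
--     """Find next task to work on.
--
--     Priority:
--     1. Active tasks (resume interrupted work)
--     2. Pending tasks (new work available)
--     3. Split tasks with all children complete (needs verification)
--     """
--     # First: resume any active task (crash recovery)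
--     for task in tasks:
--         if task.get('status') == 'active':
--             return task, 'work'
--
--     # Second: any pending tasks
--     for task in tasks:
--         if task.get('status') == 'pending':
--             return task, 'work'
--
--     # Third: split tasks ready for verification
--     for task in tasks:
--         if task.get('status') == 'split':
--             children = get_children(tasks, task['id'])
--             if children and all(c.get('status') == 'complete' for c in children):
--                 return task, 'verify'
--
--     return None, None
-- ===== SOURCE B (Python) =====
-- def get_children(tasks, parent_id):
--     """Get direct children of a task (A -> A.1, A.2, not A.1.1)."""
--     prefix = parent_id + '.'
--     parent_depth = parent_id.count('.')
--     return [t for t in tasks if t['id'].startswith(prefix)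
--             and t['id'].count('.') == parent_depth + 1]
--
-- def get_next_task(tasks):
--     """One pass bucketing tasks by status, then decide from the buckets."""
--     buckets = {}
--     for t in tasks:
--         buckets.setdefault(t.get('status'), []).append(t)
--     for status in ('active', 'pending'):
--         bucket = buckets.get(status)
--         if bucket:
--             return bucket[0], 'work'
--     for t in buckets.get('split', []):
--         children = get_children(tasks, t['id'])
--         if children and all(c.get('status') == 'complete' for c in children):
--             return t, 'verify'
--     return None, None
-- ===== Notes on version B (the rewrite author's own statement) =====
-- stated objective: alternative
-- what changed: B replaces A's three separate scans over the task list with a single bucketing pass building a status->tasks dict (insertion order preserved), then answers from the 'active'/'pending'/'split' buckets.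
import Mathlib
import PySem

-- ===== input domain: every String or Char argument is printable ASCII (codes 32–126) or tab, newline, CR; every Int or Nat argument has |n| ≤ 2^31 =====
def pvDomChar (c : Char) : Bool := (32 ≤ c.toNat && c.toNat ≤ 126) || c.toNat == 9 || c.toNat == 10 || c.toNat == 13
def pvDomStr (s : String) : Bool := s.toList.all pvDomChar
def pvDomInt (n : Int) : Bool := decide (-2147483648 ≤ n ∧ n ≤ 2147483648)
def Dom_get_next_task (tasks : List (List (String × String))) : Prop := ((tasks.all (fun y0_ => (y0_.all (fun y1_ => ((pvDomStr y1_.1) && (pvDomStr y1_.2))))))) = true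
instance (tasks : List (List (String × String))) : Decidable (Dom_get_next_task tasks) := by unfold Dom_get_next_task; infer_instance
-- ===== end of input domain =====

-- B replaces A's three scans over the task list by one bucketing pass (status -> tasks dict) plus bucket lookups; objective: alternative decomposition.


-- ===== PORT A =====
-- shared helper: Python dict lookup d.get(k) on the association-list representation (first match)
def dget (d : List (String × String)) (k : String) : Option String :=
  (d.find? (fun p => p.1 == k)).map (·.2)

-- shared helper, unchanged between A and B (as in Source B): the list comprehension of get_children.
-- t['id'] is read as (dget t "id").getD "": Pre_ excludes exactly the inputs on which Python raises KeyError here.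
def get_children (tasks : List (List (String × String))) (parent_id : String) : List (List (String × String)) :=
  let pre := parent_id ++ "."
  let depth := PySem.Str.count parent_id "."
  tasks.filter (fun t =>
    PySem.Str.startswith ((dget t "id").getD "") pre
      && (PySem.Str.count ((dget t "id").getD "") "." == depth + 1))

-- body of A's third loop after the status test: children nonempty and all complete
def splitReady (tasks : List (List (String × String))) (t : List (String × String)) : Bool :=
  let children := get_children tasks ((dget t "id").getD "")
  !children.isEmpty && children.all (fun c => dget c "status" == some "complete")

def get_next_task (tasks : List (List (String × String))) : (Option (List (String × String))) × Option String :=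
  match tasks.find? (fun t => dget t "status" == some "active") with
  | some t => (some t, some "work")
  | none =>
    match tasks.find? (fun t => dget t "status" == some "pending") with
    | some t => (some t, some "work")
    | none =>
      match tasks.find? (fun t => dget t "status" == some "split" && splitReady tasks t) with
      | some t => (some t, some "verify")
      | none => (none, none)

-- ===== PORT B =====
-- one bucketing pass: buckets.setdefault(t.get('status'), []).append(t)
def statusBuckets (tasks : List (List (String × String))) :
    PySem.Dict (Option String) (List (List (String × String))) :=
  tasks.foldl (fun d t => d.modify (dget t "status") [] (· ++ [t])) PySem.Dict.empty

-- B's last loop: scan the 'split' bucket for the first task ready for verification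
def splitScan (tasks : List (List (String × String))) :
    List (List (String × String)) → (Option (List (String × String))) × Option String
  | [] => (none, none)
  | t :: rest => if splitReady tasks t then (some t, some "verify") else splitScan tasks rest

def get_next_task_alt (tasks : List (List (String × String))) : (Option (List (String × String))) × Option String :=
  let b := statusBuckets tasks
  match b.getD (some "active") [] with
  | t :: _ => (some t, some "work")
  | [] =>
    match b.getD (some "pending") [] with
    | t :: _ => (some t, some "work")
    | [] => splitScan tasks (b.getD (some "split") [])

-- ===== PRECONDITION & SPEC =====
-- Pre_ excludes exactly the inputs on which Python's A raises KeyError (t['id'] on a task without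
-- an 'id' key, reachable only when no task is active or pending and some task has status 'split');
-- B raises the same KeyError there.
def Pre_get_next_task (tasks : List (List (String × String))) : Prop :=
  (tasks.any (fun t => dget t "status" == some "active")
    || tasks.any (fun t => dget t "status" == some "pending")
    || !(tasks.any (fun t => dget t "status" == some "split"))
    || tasks.all (fun t => (dget t "id").isSome)) = true
instance (tasks : List (List (String × String))) : Decidable (Pre_get_next_task tasks) := by unfold Pre_get_next_task; infer_instance

def pvWitness_get_next_task : (List (List (String × String))) := [[("id", "A"), ("status", "pending")]]

def Spec_get_next_task (tasks : List (List (String × String))) (out : (Option (List (String × String))) × Option String) : Prop := out = get_next_task_alt tasks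
instance (tasks : List (List (String × String))) (out : (Option (List (String × String))) × Option String) : Decidable (Spec_get_next_task tasks out) := by unfold Spec_get_next_task; infer_instance

-- ===== CLAIM (what is proved, stated in full; the proofs are below) =====
def Claim_equal_get_next_task : Prop := ∀ (tasks : List (List (String × String))), Dom_get_next_task tasks → Pre_get_next_task tasks → Spec_get_next_task tasks (get_next_task tasks)

-- ===== LEMMAS AND PROOFS =====

-- the bucketing fold appends each task to the bucket of its status
theorem bucketsAux (k : Option String) :
    ∀ (l : List (List (String × String))) (d : PySem.Dict (Option String) (List (List (String × String)))),
      (l.foldl (fun d t => d.modify (dget t "status") [] (· ++ [t])) d).getD k []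
        = d.getD k [] ++ l.filter (fun t => dget t "status" == k)
  | [], d => by simp
  | t :: rest, d => by
    rw [List.foldl_cons, bucketsAux k rest, PySem.Dict.getD_modify, List.filter_cons]
    by_cases h : k = dget t "status"
    · simp [h]
    · simp [h, Ne.symm h]

-- the bucket for key k is exactly the filter of tasks with that status, in order
theorem statusBuckets_getD (tasks : List (List (String × String))) (k : Option String) :
    (statusBuckets tasks).getD k [] = tasks.filter (fun t => dget t "status" == k) := by
  unfold statusBuckets
  rw [bucketsAux]
  simp

-- B's split-bucket scan equals A's find? over the whole list with the conjoined predicate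
theorem splitScan_eq_find? (tasks l : List (List (String × String))) :
    splitScan tasks (l.filter (fun t => dget t "status" == some "split"))
      = match l.find? (fun t => dget t "status" == some "split" && splitReady tasks t) with
        | some t => (some t, some "verify")
        | none => (none, none) := by
  induction l with
  | nil => rfl
  | cons t rest ih =>
    by_cases hs : (dget t "status" == some "split") = true
    · by_cases hr : splitReady tasks t = true
      · simp [hs, hr, splitScan]
      · simp [hs, hr, splitScan, ih]
    · simp [hs, ih]

-- ===== VERDICT (by name: the statement is the Claim_ definition above) =====
theorem get_next_task_spec : Claim_equal_get_next_task := by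
  intro tasks _ _
  unfold Spec_get_next_task
  simp only [get_next_task, get_next_task_alt, statusBuckets_getD, splitScan_eq_find?]
  rw [← List.head?_filter (p := fun t => dget t "status" == some "active"),
      ← List.head?_filter (p := fun t => dget t "status" == some "pending")]
  cases h1 : List.filter (fun t => dget t "status" == some "active") tasks with
  | cons t tl => simp
  | nil =>
    cases h2 : List.filter (fun t => dget t "status" == some "pending") tasks with
    | cons t tl => simp
    | nil => simp
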